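-- pv_equiv track=rewrite | github.com/Ofc0urs3/PythonSorts | main.py | check
-- ===== SOURCE A (Python) =====
-- def check(a):
--     neg = 0
--     while neg < len(a) and a[neg] <= 0:
--         neg += 1
--     if neg == len(a):
--         return 1
--     prev = a[neg]
--     for i in range(neg, len(a)):
--         if a[i] <= 0:
--             return 0
--         if a[i] < prev:
--             return 0
--         prev = a[i]
--     return 1
-- ===== SOURCE B (Python) =====
-- def check(a):
--     i = next((j for j, x in enumerate(a) if x > 0), None)
--     if i is None:
--         return 1
--     s = a[i:]
--     return 1 if sorted(s) == s else 0
-- ===== Notes on version B (the rewrite author's own statement) =====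
-- stated objective: simpler
-- what changed: Replaces the index-based while loop plus guarded for loop with a single first-positive scan, a suffix slice, and one sorted(s)==s comparison (positivity of the suffix follows from its positive head).
import Mathlib
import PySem

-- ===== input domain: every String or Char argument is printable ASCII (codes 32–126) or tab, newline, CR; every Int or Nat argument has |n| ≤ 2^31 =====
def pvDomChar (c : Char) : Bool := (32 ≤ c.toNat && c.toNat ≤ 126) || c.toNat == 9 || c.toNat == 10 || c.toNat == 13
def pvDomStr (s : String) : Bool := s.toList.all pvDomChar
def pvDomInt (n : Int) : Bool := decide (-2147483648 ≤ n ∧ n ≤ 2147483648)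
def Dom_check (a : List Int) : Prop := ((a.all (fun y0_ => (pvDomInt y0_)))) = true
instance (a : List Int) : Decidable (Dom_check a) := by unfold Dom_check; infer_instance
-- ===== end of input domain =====

-- B: single first-positive scan + suffix slice + sorted(s)==s comparison instead of A's
-- index-based while loop and guarded for loop; objective: simpler.


-- ===== PORT A =====
-- while neg < len(a) and a[neg] <= 0: neg += 1
def checkWhile (a : List Int) (neg : Nat) : Nat :=
  if neg < a.length then
    if PySem.List.pyGetD a (neg : Int) 0 ≤ 0 then checkWhile a (neg + 1) else neg
  else neg
termination_by a.length - neg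

-- for i in range(neg, len(a)): …  (an early 'return 0' ends the recursion)
def checkFor (a : List Int) (idxs : List Int) (prev : Int) : Int :=
  match idxs with
  | [] => 1
  | i :: rest =>
    if PySem.List.pyGetD a i 0 ≤ 0 then 0
    else if PySem.List.pyGetD a i 0 < prev then 0
    else checkFor a rest (PySem.List.pyGetD a i 0)

def check (a : List Int) : Int :=
  let neg := checkWhile a 0
  if neg = a.length then 1
  else
    let prev := PySem.List.pyGetD a (neg : Int) 0
    checkFor a (PySem.List.pyRange (neg : Int) (a.length : Int) 1) prev

-- ===== PORT B =====
def check_alt (a : List Int) : Int :=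
  match a.findIdx? (fun x => decide (0 < x)) with
  | none => 1
  | some i =>
    let s := PySem.List.slice a (some (i : Int)) none
    if PySem.List.sorted s (fun x => x) false = s then 1 else 0

-- ===== PRECONDITION & SPEC =====
def Spec_check (a : List Int) (out : Int) : Prop := out = check_alt a
instance (a : List Int) (out : Int) : Decidable (Spec_check a out) := by unfold Spec_check; infer_instance

-- ===== CLAIM (what is proved, stated in full; the proofs are below) =====
def Claim_equal_check : Prop := ∀ (a : List Int), Dom_check a → Spec_check a (check a)

-- ===== LEMMAS AND PROOFS =====

-- the for-loop on the element list
def loopL : List Int → Int → Int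
  | [], _ => 1
  | x :: t, prev => if x ≤ 0 then 0 else if x < prev then 0 else loopL t x

theorem loopL_eq (s : List Int) (prev : Int) :
    loopL s prev = if ((prev :: s).Pairwise (· ≤ ·) ∧ ∀ y ∈ s, 0 < y) then 1 else 0 := by
  induction s generalizing prev with
  | nil => simp [loopL]
  | cons x t ih =>
    simp only [loopL]
    by_cases hx : x ≤ 0
    · rw [if_pos hx, if_neg]
      rintro ⟨-, hpos⟩
      exact absurd (hpos x (by simp)) (by omega)
    · rw [if_neg hx]
      by_cases hxp : x < prev
      · rw [if_pos hxp, if_neg]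
        rintro ⟨hp, -⟩
        exact absurd (List.rel_of_pairwise_cons hp (show x ∈ x :: t by simp)) (by omega)
      · rw [if_neg hxp, ih x]
        refine if_congr ⟨?_, ?_⟩ rfl rfl
        · rintro ⟨hp, hpos⟩
          refine ⟨List.pairwise_cons.mpr ⟨?_, hp⟩, ?_⟩
          · intro y hy
            rcases List.mem_cons.mp hy with rfl | hy
            · omega
            · exact le_trans (by omega) (List.rel_of_pairwise_cons hp hy)
          · intro y hy
            rcases List.mem_cons.mp hy with rfl | hy
            · omega
            · exact hpos y hy
        · rintro ⟨hp, hpos⟩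
          exact ⟨(List.pairwise_cons.mp hp).2, fun y hy => hpos y (List.mem_cons_of_mem _ hy)⟩

theorem checkWhile_eq (a : List Int) (n : Nat) (hn : n ≤ a.length) :
    checkWhile a n =
      match (a.drop n).findIdx? (fun x => decide (0 < x)) with
      | none => a.length
      | some j => n + j := by
  rcases Nat.lt_or_ge n a.length with h | h
  · have hd : a.drop n = a[n] :: a.drop (n + 1) := (List.getElem_cons_drop h).symm
    rw [checkWhile]
    simp only [h, if_true, PySem.List.pyGetD_natCast, List.getD_eq_getElem?_getD,
      List.getElem?_eq_getElem h, Option.getD_some]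
    by_cases hle : a[n] ≤ 0
    · rw [if_pos hle, checkWhile_eq a (n + 1) h]
      rw [hd, List.findIdx?_cons]
      rw [show decide (0 < a[n]) = false by simpa using hle, if_neg (by simp)]
      cases hfi : (a.drop (n + 1)).findIdx? (fun x => decide (0 < x)) with
      | none => simp
      | some j =>
        simp only [Option.map_some]
        exact Nat.add_right_comm n 1 j ▸ Nat.add_assoc n j 1
    · rw [if_neg hle, hd, List.findIdx?_cons]
      rw [show decide (0 < a[n]) = true by simpa using hle]
      simp
  · rw [checkWhile]
    have hn' : n = a.length := le_antisymm hn h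
    simp [hn', List.drop_length]
termination_by a.length - n

theorem checkFor_eq (a : List Int) (n : Nat) (prev : Int) (hn : n ≤ a.length) :
    checkFor a (PySem.List.pyRange (n : Int) (a.length : Int) 1) prev = loopL (a.drop n) prev := by
  rcases Nat.lt_or_ge n a.length with h | h
  · have hd : a.drop n = a[n] :: a.drop (n + 1) := (List.getElem_cons_drop h).symm
    rw [PySem.List.pyRange_one_cons (by exact_mod_cast h), hd]
    simp only [checkFor, loopL, PySem.List.pyGetD_natCast, List.getD_eq_getElem?_getD,
      List.getElem?_eq_getElem h, Option.getD_some]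
    have : ((n : Int) + 1) = ((n + 1 : Nat) : Int) := by push_cast; ring
    rw [this, checkFor_eq a (n + 1) a[n] h]
  · have hn' : n = a.length := le_antisymm hn h
    rw [hn', PySem.List.pyRange_one_eq_nil (le_refl _), List.drop_length]
    rfl
termination_by a.length - n

theorem sorted_id_eq_iff_pairwise (s : List Int) :
    PySem.List.sorted s (fun x => x) false = s ↔ s.Pairwise (· ≤ ·) := by
  constructor
  · intro h
    have hp := PySem.List.sorted_pairwise s (fun x => x)
    rw [h] at hp
    exact hp
  · intro h
    exact PySem.List.sorted_eq_self_of_pairwise s (fun x => x) h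

theorem check_eq_alt (a : List Int) : check a = check_alt a := by
  unfold check check_alt
  rw [checkWhile_eq a 0 (Nat.zero_le _)]
  cases hfi : a.findIdx? (fun x => decide (0 < x)) with
  | none => simp [hfi]
  | some i =>
    have hi : i < a.length := (List.findIdx?_eq_some_iff_findIdx_eq.mp hfi).1
    have hpi : 0 < a[i] := by
      have h2 := List.of_findIdx?_eq_some hfi
      rw [List.getElem?_eq_getElem hi] at h2
      simpa using h2
    simp only [List.drop_zero, hfi, Nat.zero_add]
    rw [if_neg (by omega)]
    have hd : a.drop i = a[i] :: a.drop (i + 1) := (List.getElem_cons_drop hi).symm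
    rw [checkFor_eq a i _ (le_of_lt hi), PySem.List.slice_from_natCast]
    simp only [PySem.List.pyGetD_natCast, List.getD_eq_getElem?_getD,
      List.getElem?_eq_getElem hi, Option.getD_some]
    rw [hd, loopL_eq]
    by_cases hp : (a[i] :: a.drop (i + 1)).Pairwise (· ≤ ·)
    · rw [if_pos, if_pos ((sorted_id_eq_iff_pairwise _).mpr hp)]
      refine ⟨List.pairwise_cons.mpr ⟨?_, hp⟩, ?_⟩
      · intro y hy
        rcases List.mem_cons.mp hy with rfl | hy
        · exact le_refl _
        · exact List.rel_of_pairwise_cons hp hy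
      · intro y hy
        rcases List.mem_cons.mp hy with rfl | hy
        · exact hpi
        · exact lt_of_lt_of_le hpi (List.rel_of_pairwise_cons hp hy)
    · rw [if_neg, if_neg (fun hc => hp ((sorted_id_eq_iff_pairwise _).mp hc))]
      rintro ⟨hc, -⟩
      exact hp (List.pairwise_cons.mp hc).2

-- ===== VERDICT (by name: the statement is the Claim_ definition above) =====
theorem check_spec : Claim_equal_check := by
  intro a _
  unfold Spec_check
  exact check_eq_alt a
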